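-- pv_equiv track=rewrite | github.com/CODE-U-S/Coding_Test_Study | 2st/Riyeon/저주의 숫자 3.py | solution
-- ===== SOURCE A (Python) =====
-- def solution(n):
--     answer = 0
--     for _ in range(0, n):
--         answer += 1
--         while True:
--             if '3' in str(answer) or answer % 3 ==0:
--                 answer += 1
--             else:
--                 break
--
--     return answer
-- ===== SOURCE B (Python) =====
-- def solution(n):
--     # nth positive integer with no digit 3 and not divisible by 3, via a
--     # closed-form digit construction (no scanning): each decade whose prefix q
--     # has no digit 3 contains exactly 6 such numbers, and the p-th no-3 prefix
--     # is p written in base 9 with digits {0,1,2,4,5,6,7,8,9}.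
--     if n <= 0:
--         return 0
--     p, j = divmod(n - 1, 6)
--     q = 0
--     mul = 1
--     while p > 0:
--         p, e = divmod(p, 9)
--         q += (e if e < 3 else e + 1) * mul
--         mul *= 10
--     ds = [d for d in range(10) if d != 3 and (q + d) % 3 != 0]
--     return 10 * q + ds[j]
-- ===== Notes on version B (the rewrite author's own statement) =====
-- stated objective: faster
-- what changed: replaces the linear scan that tests every integer for a '3' digit and divisibility by 3 with a closed-form digit construction: the answer's decade prefix is the ((n-1)//6)-th digit-3-free number, obtained by writing (n-1)//6 in base 9, and the last digit is picked from the 6 admissible digits of that decade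
import Mathlib
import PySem

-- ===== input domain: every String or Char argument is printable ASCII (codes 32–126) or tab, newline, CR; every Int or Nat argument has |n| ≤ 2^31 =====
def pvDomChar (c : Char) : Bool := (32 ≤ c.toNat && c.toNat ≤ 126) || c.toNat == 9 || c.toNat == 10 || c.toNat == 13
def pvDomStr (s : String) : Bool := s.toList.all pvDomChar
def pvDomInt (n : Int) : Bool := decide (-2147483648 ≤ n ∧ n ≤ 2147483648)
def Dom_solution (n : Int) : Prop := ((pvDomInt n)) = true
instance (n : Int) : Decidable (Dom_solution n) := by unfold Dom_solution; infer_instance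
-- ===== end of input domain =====

-- B replaces A's linear scan (test every integer for a '3' digit / divisibility by 3)
-- with a closed-form digit construction; equivalence of the return values is proved below.

-- B replaces A's linear scan (test every integer for a digit '3' or divisibility
-- by 3) by a closed-form digit construction: each decade whose prefix has no
-- digit 3 contains exactly 6 counted numbers, and the p-th digit-3-free prefix
-- is p written in base 9 with digit alphabet {0,1,2,4,5,6,7,8,9}.

-- ===== PORT A =====
-- '3' in str(answer) or answer % 3 == 0
def pvBadA (a : Int) : Bool :=
  PySem.Str.isIn "3" (PySem.Int.toStr a) || (PySem.Int.mod a 3 == 0)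

-- A's 'while True: if bad: answer += 1 else: break' loop; the fuel argument is
-- only a totality guard (the proof shows the supplied fuel always reaches the break)
def pvSkipA : Nat → Int → Int
  | 0, a => a
  | fuel + 1, a => if pvBadA a then pvSkipA fuel (a + 1) else a

def solution (n : Int) : Int :=
  (PySem.List.pyRange 0 n 1).foldl
    (fun answer _ => pvSkipA (2 * answer + 42).toNat (answer + 1)) 0

-- ===== PORT B =====
-- Source B's 'while p > 0: p, e = divmod(p, 9); q += (e if e < 3 else e + 1) * mul; mul *= 10';
-- the fuel argument is only a totality guard: p strictly decreases, so fuel p.toNat + 1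
-- always reaches p = 0
def pvQloop : Nat → Int → Int → Int → Int
  | 0, _, q, _ => q
  | fuel + 1, p, q, mul =>
    if 0 < p then
      pvQloop fuel (PySem.Int.floordiv p 9)
        (q + (if PySem.Int.mod p 9 < 3 then PySem.Int.mod p 9 else PySem.Int.mod p 9 + 1) * mul)
        (mul * 10)
    else q

def solution_alt (n : Int) : Int :=
  if n ≤ 0 then 0
  else
    let p := PySem.Int.floordiv (n - 1) 6
    let j := PySem.Int.mod (n - 1) 6
    let q := pvQloop (p.toNat + 1) p 0 1
    let ds := (PySem.List.pyRange 0 10 1).filter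
      (fun d => !(d == 3) && !(PySem.Int.mod (q + d) 3 == 0))
    -- ds[j]: j = (n-1) % 6 < 6 = len(ds), so the Python index never raises;
    -- the .getD 0 default is unreachable (pvDs_len below)
    10 * q + (PySem.List.pyGet? ds j).getD 0

-- ===== PRECONDITION & SPEC =====
def Spec_solution (n : Int) (out : Int) : Prop := out = solution_alt n
instance (n : Int) (out : Int) : Decidable (Spec_solution n out) := by unfold Spec_solution; infer_instance

-- ===== CLAIM (what is proved, stated in full; the proofs are below) =====
def Claim_equal_solution : Prop := ∀ (n : Int), Dom_solution n → Spec_solution n (solution n)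

-- ===== LEMMAS AND PROOFS =====


def pvHas3 (n : Nat) : Bool :=
  if h : n < 10 then n == 3 else (n % 10 == 3) || pvHas3 (n / 10)
decreasing_by exact Nat.div_lt_self (by omega) (by omega)

lemma pvHas3_step (a d : Nat) (hd : d < 10) :
    pvHas3 (10 * a + d) = ((d == 3) || pvHas3 a) := by
  rcases Nat.eq_zero_or_pos a with ha | ha
  · subst ha; rw [pvHas3]; simp [hd]
    rw [pvHas3]; simp
  · rw [pvHas3]
    have h1 : ¬ (10 * a + d < 10) := by omega
    have h2 : (10 * a + d) % 10 = d := by omega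
    have h3 : (10 * a + d) / 10 = a := by omega
    simp [h1, h2, h3]

lemma digitChar_eq3 (d : Nat) (hd : d < 10) : Nat.digitChar d = '3' ↔ d = 3 := by
  interval_cases d <;> simp [Nat.digitChar]

lemma mem_toDigits_iff (m : Nat) : ('3' ∈ Nat.toDigits 10 m) ↔ pvHas3 m = true := by
  induction m using Nat.strong_induction_on with
  | _ m ih =>
    rw [Nat.toDigits_eq_if (by norm_num)]
    by_cases h : m < 10
    · simp [h]
      rw [pvHas3]
      simp only [eq_comm (a := '3'), dif_pos h, beq_iff_eq]
      exact digitChar_eq3 m h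
    · simp only [h, if_false, List.mem_append, List.mem_singleton]
      rw [ih (m / 10) (Nat.div_lt_self (by omega) (by omega))]
      conv_rhs => rw [pvHas3]
      have hmod : m % 10 < 10 := by omega
      simp only [eq_comm (a := '3'), dif_neg h, Bool.or_eq_true, beq_iff_eq]
      rw [digitChar_eq3 _ hmod]
      tauto

lemma singleton_infix_iff {c : Char} {l : List Char} : [c] <:+: l ↔ c ∈ l := by
  constructor
  · intro h; exact h.subset (List.mem_singleton_self c)
  · intro h
    rcases List.mem_iff_append.mp h with ⟨s, t, rfl⟩
    exact ⟨s, t, by simp⟩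

def pvGood (y : Nat) : Prop := 1 ≤ y ∧ pvHas3 y = false ∧ y % 3 ≠ 0

lemma pvBadA_iff (y : Int) (hy : 1 ≤ y) : pvBadA y = false ↔ pvGood y.toNat := by
  unfold pvBadA pvGood
  have h1 : PySem.Str.isIn "3" (PySem.Int.toStr y)
      = PySem.Chars.isIn ['3'] (Nat.toDigits 10 y.toNat) := by
    simp [PySem.Str.isIn, PySem.Int.toStr, String.toList_ofList, PySem.Int.toChars,
      show ¬ (y < 0) by omega]
  have h2 : PySem.Int.mod y 3 = y % 3 := by
    rw [PySem.Int.mod, Int.fmod_eq_emod]; simp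
  rw [h1, h2]
  have h3 : (PySem.Chars.isIn ['3'] (Nat.toDigits 10 y.toNat) = false)
      ↔ pvHas3 y.toNat = false := by
    rw [← Bool.not_eq_true, ← Bool.not_eq_true,
        PySem.Chars.isIn_iff_infix, singleton_infix_iff, mem_toDigits_iff]
  constructor
  · intro h
    simp only [Bool.or_eq_false_iff, beq_eq_false_iff_ne] at h
    exact ⟨by omega, h3.mp h.1, by omega⟩
  · intro ⟨ha, hb, hc⟩
    simp only [Bool.or_eq_false_iff, beq_eq_false_iff_ne]
    exact ⟨h3.mpr hb, by omega⟩

def pvM (e : Nat) : Nat := if e < 3 then e else e + 1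

def pvQ (p : Nat) : Nat :=
  if h : p = 0 then 0 else 10 * pvQ (p / 9) + pvM (p % 9)
decreasing_by exact Nat.div_lt_self (by omega) (by omega)

def pvR (x : Nat) : Nat :=
  if h : x = 0 then 0 else 9 * pvR (x / 10) + (if x % 10 < 3 then x % 10 else x % 10 - 1)
decreasing_by exact Nat.div_lt_self (by omega) (by omega)

lemma pvQ_zero : pvQ 0 = 0 := by rw [pvQ]; simp

lemma pvQ_eq (p : Nat) (hp : p ≠ 0) : pvQ p = 10 * pvQ (p / 9) + pvM (p % 9) := by
  rw [pvQ]; simp [hp]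

lemma pvM_lt (e : Nat) (he : e < 9) : pvM e < 10 := by unfold pvM; split <;> omega

lemma pvM_ne3 (e : Nat) : pvM e ≠ 3 := by unfold pvM; split <;> omega

lemma pvHas3_zero : pvHas3 0 = false := by rw [pvHas3]; simp

lemma pvQ_no3 (p : Nat) : pvHas3 (pvQ p) = false := by
  induction p using Nat.strong_induction_on with
  | _ p ih =>
    rcases Nat.eq_zero_or_pos p with hp | hp
    · subst hp; rw [pvQ_zero]; exact pvHas3_zero
    · rw [pvQ_eq p (by omega),
        pvHas3_step _ _ (pvM_lt _ (Nat.mod_lt _ (by omega)))]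
      simp [pvM_ne3, ih (p / 9) (Nat.div_lt_self (by omega) (by omega))]

lemma pvQ_pos (p : Nat) (hp : 1 ≤ p) : 1 ≤ pvQ p := by
  induction p using Nat.strong_induction_on with
  | _ p ih =>
    rw [pvQ_eq p (by omega)]
    rcases Nat.eq_zero_or_pos (p % 9) with he | he
    · have h9 : 1 ≤ p / 9 := by omega
      have := ih (p / 9) (Nat.div_lt_self (by omega) (by omega)) h9
      omega
    · have : 1 ≤ pvM (p % 9) := by unfold pvM; split <;> omega
      omega

lemma pvM_mono {e e' : Nat} (h : e < e') : pvM e < pvM e' := by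
  unfold pvM; split <;> split <;> omega

lemma pvQ_mono {p p' : Nat} (h : p < p') : pvQ p < pvQ p' := by
  induction p' using Nat.strong_induction_on generalizing p with
  | _ p' ih =>
    rcases Nat.eq_zero_or_pos p with hp | hp
    · subst hp; rw [pvQ_zero]; exact pvQ_pos p' (by omega)
    · rw [pvQ_eq p (by omega), pvQ_eq p' (by omega)]
      have hd : p / 9 ≤ p' / 9 := Nat.div_le_div_right (by omega)
      rcases Nat.lt_or_ge (p / 9) (p' / 9) with hlt | hge
      · have h1 : pvQ (p / 9) < pvQ (p' / 9) := by apply ih <;> omega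
        have h2 := pvM_lt (p % 9) (Nat.mod_lt _ (by omega))
        omega
      · have heq : p / 9 = p' / 9 := by omega
        have he : p % 9 < p' % 9 := by omega
        have := pvM_mono he
        rw [heq]
        omega

lemma pvQ_le_mono {p p' : Nat} (h : p ≤ p') : pvQ p ≤ pvQ p' := by
  rcases Nat.lt_or_ge p p' with h1 | h1
  · exact Nat.le_of_lt (pvQ_mono h1)
  · have : p = p' := by omega
    subst this; exact le_refl _

lemma pvHas3_parts (x : Nat) (h : pvHas3 x = false) :
    x % 10 ≠ 3 ∧ pvHas3 (x / 10) = false := by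
  by_cases hx : x < 10
  · rw [pvHas3] at h; simp [hx] at h
    constructor
    · omega
    · rw [Nat.div_eq_of_lt hx]; exact pvHas3_zero
  · rw [pvHas3] at h; simp [hx] at h
    exact ⟨by omega, h.2⟩

lemma pvQ_surj (x : Nat) (hx : pvHas3 x = false) : pvQ (pvR x) = x := by
  induction x using Nat.strong_induction_on with
  | _ x ih =>
    rcases Nat.eq_zero_or_pos x with h0 | h0
    · subst h0; rw [pvR]; simp [pvQ_zero]
    · obtain ⟨hd3, hq3⟩ := pvHas3_parts x hx
      rw [pvR]; simp only [show ¬ (x = 0) by omega, dite_false]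
      set m' := (if x % 10 < 3 then x % 10 else x % 10 - 1) with hm'
      have hm'8 : m' < 9 := by rw [hm']; split <;> omega
      -- pvR x > 0
      have hRpos : 0 < 9 * pvR (x / 10) + m' := by
        rcases Nat.eq_zero_or_pos (x % 10) with hz | hz
        · have hx10 : 1 ≤ x / 10 := by omega
          have hQR := ih (x / 10) (Nat.div_lt_self (by omega) (by omega)) hq3
          have : 1 ≤ pvR (x / 10) := by
            by_contra hc
            have : pvR (x / 10) = 0 := by omega
            rw [this, pvQ_zero] at hQR; omega
          omega
        · have : 1 ≤ m' := by rw [hm']; split <;> omega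
          omega
      rw [pvQ_eq _ (by omega)]
      have hdiv : (9 * pvR (x / 10) + m') / 9 = pvR (x / 10) := by omega
      have hmod : (9 * pvR (x / 10) + m') % 9 = m' := by omega
      rw [hdiv, hmod, ih (x / 10) (Nat.div_lt_self (by omega) (by omega)) hq3]
      have hpm : pvM m' = x % 10 := by
        rcases Nat.lt_or_ge (x % 10) 3 with hc | hc
        · rw [hm', if_pos hc]; unfold pvM; rw [if_pos hc]
        · rw [hm', if_neg (by omega)]; unfold pvM; rw [if_neg (by omega)]; omega
      rw [hpm]; omega

lemma pvQ_gap {p x : Nat} (h1 : pvQ p < x) (h2 : x < pvQ (p + 1)) : pvHas3 x = true := by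
  by_contra hc
  have hc' : pvHas3 x = false := by
    cases h : pvHas3 x
    · rfl
    · exact absurd h hc
  have hs := pvQ_surj x hc'
  have hlo : p < pvR x := by
    by_contra hle
    have := pvQ_le_mono (p := pvR x) (p' := p) (by omega)
    omega
  have hhi : pvR x < p + 1 := by
    by_contra hge
    have := pvQ_le_mono (p := p + 1) (p' := pvR x) (by omega)
    omega
  omega

lemma pvQ_growth (p : Nat) : pvQ (p + 1) ≤ 2 * pvQ p + 2 := by
  induction p using Nat.strong_induction_on with
  | _ p ih =>
    rcases Nat.eq_zero_or_pos p with h0 | h0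
    · subst h0; rw [pvQ_eq 1 (by omega)]
      simp [pvQ_zero, pvM, pvQ_zero]
    · rcases Nat.lt_or_ge (p % 9) 8 with he | he
      · rw [pvQ_eq p (by omega), pvQ_eq (p + 1) (by omega)]
        have hd : (p + 1) / 9 = p / 9 := by omega
        have hm : (p + 1) % 9 = p % 9 + 1 := by omega
        rw [hd, hm]
        have : pvM (p % 9 + 1) ≤ pvM (p % 9) + 2 := by unfold pvM; split <;> split <;> omega
        omega
      · have he8 : p % 9 = 8 := by omega
        rw [pvQ_eq p (by omega), pvQ_eq (p + 1) (by omega)]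
        have hd : (p + 1) / 9 = p / 9 + 1 := by omega
        have hm : (p + 1) % 9 = 0 := by omega
        rw [hd, hm, he8]
        have hih := ih (p / 9) (Nat.div_lt_self (by omega) (by omega))
        have hm0 : pvM 0 = 0 := rfl
        have hm8 : pvM 8 = 9 := rfl
        rw [hm0, hm8]
        omega

def pvDs (q : Nat) : List Nat :=
  (List.range 10).filter (fun d => d ≠ 3 && (q + d) % 3 ≠ 0)

lemma pvDs_mod (q : Nat) : pvDs q = pvDs (q % 3) := by
  unfold pvDs
  apply List.filter_congr
  intro d _
  have h : (q + d) % 3 = (q % 3 + d) % 3 := by omega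
  rw [h]

lemma pvDs_len (q : Nat) : (pvDs q).length = 6 := by
  rw [pvDs_mod]
  have h : q % 3 = 0 ∨ q % 3 = 1 ∨ q % 3 = 2 := by omega
  rcases h with h | h | h <;> rw [h] <;> decide

lemma pvDs_mem (q d : Nat) (hd : d < 10) : d ∈ pvDs q ↔ d ≠ 3 ∧ (q + d) % 3 ≠ 0 := by
  unfold pvDs
  simp [List.mem_filter, List.mem_range, hd]

lemma pvDs_lt10 {q d : Nat} (h : d ∈ pvDs q) : d < 10 := by
  unfold pvDs at h
  simp [List.mem_filter, List.mem_range] at h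
  exact h.1

lemma pvDs_pairwise (q : Nat) : List.Pairwise (· < ·) (pvDs q) :=
  List.Pairwise.filter _ (List.pairwise_lt_range)

def pvV (i : Nat) : Nat := 10 * pvQ (i / 6) + (pvDs (pvQ (i / 6))).getD (i % 6) 0

def pvB (k : Nat) : Nat := if k = 0 then 0 else pvV (k - 1)

-- the j-th admissible digit is in pvDs
lemma pvDs_getD_mem (q j : Nat) (hj : j < 6) : (pvDs q).getD j 0 ∈ pvDs q := by
  rw [List.getD_eq_getElem _ _ (by rw [pvDs_len]; omega)]
  exact List.getElem_mem _

lemma pvDs_getD_lt (q j j' : Nat) (hj : j < j') (hj' : j' < 6) :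
    (pvDs q).getD j 0 < (pvDs q).getD j' 0 := by
  have hl := pvDs_len q
  rw [List.getD_eq_getElem _ _ (by omega), List.getD_eq_getElem _ _ (by omega)]
  exact (List.pairwise_iff_getElem.mp (pvDs_pairwise q)) _ _ _ _ hj

-- a member strictly between two consecutive entries cannot exist;
-- more precisely: any member above entry j is at least entry (j+1), etc.
lemma pvDs_no_between {q d j : Nat} (hd : d ∈ pvDs q) (hj : j + 1 < 6)
    (h1 : (pvDs q).getD j 0 < d) (h2 : d < (pvDs q).getD (j + 1) 0) : False := by
  have hl := pvDs_len q
  obtain ⟨m, hm, hdm⟩ := List.mem_iff_getElem.mp hd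
  have hpw := List.pairwise_iff_getElem.mp (pvDs_pairwise q)
  rw [List.getD_eq_getElem _ _ (by omega)] at h1
  rw [List.getD_eq_getElem _ _ (by omega)] at h2
  rcases Nat.lt_or_ge m (j + 1) with hc | hc
  · rcases Nat.lt_or_ge m j with hc2 | hc2
    · have := hpw m j (by omega) (by omega) hc2
      omega
    · have : m = j := by omega
      subst this; omega
  · rcases Nat.lt_or_ge (j + 1) m with hc2 | hc2
    · have := hpw (j + 1) m (by omega) (by omega) hc2
      omega
    · have : m = j + 1 := by omega
      subst this; omega

lemma pvDs_max {q d : Nat} (hd : d ∈ pvDs q) : d ≤ (pvDs q).getD 5 0 := by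
  have hl := pvDs_len q
  obtain ⟨m, hm, hdm⟩ := List.mem_iff_getElem.mp hd
  have hpw := List.pairwise_iff_getElem.mp (pvDs_pairwise q)
  rw [List.getD_eq_getElem _ _ (by omega)]
  rcases Nat.lt_or_ge m 5 with hc | hc
  · have := hpw m 5 (by omega) (by omega) hc
    omega
  · have : m = 5 := by omega
    subst this; omega

lemma pvDs_min {q d : Nat} (hd : d ∈ pvDs q) : (pvDs q).getD 0 0 ≤ d := by
  have hl := pvDs_len q
  obtain ⟨m, hm, hdm⟩ := List.mem_iff_getElem.mp hd
  have hpw := List.pairwise_iff_getElem.mp (pvDs_pairwise q)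
  rw [List.getD_eq_getElem _ _ (by omega)]
  rcases Nat.lt_or_ge 0 m with hc | hc
  · have := hpw 0 m (by omega) (by omega) hc
    omega
  · have : m = 0 := by omega
    subst this; omega

lemma pvV_good (i : Nat) : pvGood (pvV i) := by
  unfold pvV
  set q := pvQ (i / 6) with hq
  set d := (pvDs q).getD (i % 6) 0 with hd
  have hmem : d ∈ pvDs q := pvDs_getD_mem q _ (by omega)
  have hd10 : d < 10 := pvDs_lt10 hmem
  obtain ⟨hne3, hmod⟩ := (pvDs_mem q d hd10).mp hmem
  refine ⟨?_, ?_, ?_⟩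
  · -- positivity: if q = 0 then d ≠ 0 since (0 + d) % 3 ≠ 0
    rcases Nat.eq_zero_or_pos q with h0 | h0
    · have : d ≠ 0 := by
        intro hdd
        rw [h0, hdd] at hmod
        omega
      omega
    · omega
  · rw [pvHas3_step q d hd10]
    simp [hne3, hq, pvQ_no3]
  · omega

lemma pvV_step (i : Nat) :
    pvV i < pvV (i + 1) ∧ pvV (i + 1) ≤ 2 * pvV i + 29 ∧
    (∀ y, pvV i < y → y < pvV (i + 1) → ¬ pvGood y) := by
  set p := i / 6 with hp
  set j := i % 6 with hj
  set q := pvQ p with hq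
  set d0 := (pvDs q).getD j 0 with hd0
  have hmem0 : d0 ∈ pvDs q := pvDs_getD_mem q _ (by omega)
  have hd010 : d0 < 10 := pvDs_lt10 hmem0
  have hVi : pvV i = 10 * q + d0 := rfl
  rcases Nat.lt_or_ge j 5 with hj5 | hj5
  · -- same decade
    have hdiv : (i + 1) / 6 = p := by omega
    have hmod : (i + 1) % 6 = j + 1 := by omega
    have hVi1 : pvV (i + 1) = 10 * q + (pvDs q).getD (j + 1) 0 := by
      unfold pvV; rw [hdiv, hmod]
    set d1 := (pvDs q).getD (j + 1) 0 with hd1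
    have hmem1 : d1 ∈ pvDs q := pvDs_getD_mem q _ (by omega)
    have hd110 : d1 < 10 := pvDs_lt10 hmem1
    have hlt : d0 < d1 := pvDs_getD_lt q j (j + 1) (by omega) (by omega)
    refine ⟨by omega, by omega, ?_⟩
    intro y hy1 hy2 hgood
    rw [hVi] at hy1; rw [hVi1] at hy2
    -- y = 10*q + dy with d0 < dy < d1
    have hdy : y = 10 * q + (y - 10 * q) := by omega
    set dy := y - 10 * q with hdyd
    have hdy10 : dy < 10 := by omega
    obtain ⟨hy0, hh3, hm3⟩ := hgood
    rw [hdy, pvHas3_step q dy hdy10] at hh3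
    simp only [Bool.or_eq_false_iff, beq_eq_false_iff_ne] at hh3
    have hmem : dy ∈ pvDs q := by
      rw [pvDs_mem q dy hdy10]
      exact ⟨hh3.1, by omega⟩
    exact pvDs_no_between (j := j) hmem (by omega) (by omega) (by omega)
  · -- rollover to the next decade
    have hj5' : j = 5 := by omega
    have hdiv : (i + 1) / 6 = p + 1 := by omega
    have hmod : (i + 1) % 6 = 0 := by omega
    have hVi1 : pvV (i + 1) = 10 * pvQ (p + 1) + (pvDs (pvQ (p + 1))).getD 0 0 := by
      unfold pvV; rw [hdiv, hmod]
    set q' := pvQ (p + 1) with hq'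
    set d1 := (pvDs q').getD 0 0 with hd1
    have hmem1 : d1 ∈ pvDs q' := pvDs_getD_mem q' _ (by omega)
    have hd110 : d1 < 10 := pvDs_lt10 hmem1
    have hqq : q < q' := pvQ_mono (by omega)
    have hgrow : q' ≤ 2 * q + 2 := pvQ_growth p
    refine ⟨by omega, by omega, ?_⟩
    intro y hy1 hy2 hgood
    rw [hVi] at hy1; rw [hVi1] at hy2
    obtain ⟨hy0, hh3, hm3⟩ := hgood
    set qy := y / 10 with hqy
    set dy := y % 10 with hdyd
    have hydec : y = 10 * qy + dy := by omega
    have hdy10 : dy < 10 := by omega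
    obtain ⟨hdne3, hqyh3⟩ := pvHas3_parts y hh3
    have hmem : dy ∈ pvDs qy := by
      rw [pvDs_mem qy dy hdy10]
      exact ⟨hdne3, by omega⟩
    have hqlo : q ≤ qy := by omega
    have hqhi : qy ≤ q' := by omega
    rcases Nat.lt_or_ge q qy with hc1 | hc1
    · rcases Nat.lt_or_ge qy q' with hc2 | hc2
      · -- strictly between decades: prefix has a digit 3
        have := pvQ_gap (p := p) (x := qy) (by omega) (by omega)
        rw [hqyh3] at this
        exact Bool.false_ne_true this
      · -- qy = q' : dy < d1 = min
        have hqy' : qy = q' := by omega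
        rw [hqy'] at hmem
        have := pvDs_min hmem
        omega
    · -- qy = q : dy > d0 = max (j = 5)
      have hqy' : qy = q := by omega
      rw [hqy'] at hmem
      have := pvDs_max hmem
      rw [hj5'] at hd0
      omega

lemma pvB_step (i : Nat) :
    pvB i < pvB (i + 1) ∧ pvB (i + 1) ≤ 2 * pvB i + 29 ∧
    pvGood (pvB (i + 1)) ∧ ∀ y, pvB i < y → y < pvB (i + 1) → ¬ pvGood y := by
  rcases Nat.eq_zero_or_pos i with h0 | h0
  · subst h0
    have h1 : pvB 0 = 0 := rfl
    have h2 : pvB 1 = pvV 0 := rfl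
    have hv0 : pvV 0 = 1 := by
      unfold pvV
      norm_num [pvQ_zero]
      decide
    have e2 : pvB (0 + 1) = 1 := by rw [show (0+1 : Nat) = 1 from rfl, h2, hv0]
    refine ⟨by omega, by omega, ?_, ?_⟩
    · rw [e2]; exact hv0 ▸ (pvV_good 0)
    · intro y hy1 hy2
      rw [h1] at hy1; rw [e2] at hy2
      omega
  · have hb1 : pvB i = pvV (i - 1) := by unfold pvB; simp [show ¬ (i = 0) by omega]
    have hb2 : pvB (i + 1) = pvV i := by unfold pvB; simp
    have hs := pvV_step (i - 1)
    have hieq : i - 1 + 1 = i := by omega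
    rw [hieq] at hs
    refine ⟨by omega, by omega, ?_, ?_⟩
    · rw [hb2]; exact pvV_good i
    · intro y hy1 hy2
      rw [hb1] at hy1; rw [hb2] at hy2
      exact hs.2.2 y hy1 hy2

lemma pvSkipA_exact (fuel : Nat) (a t : Int) (hat : a ≤ t) (h1 : 1 ≤ a)
    (hbad : ∀ y : Int, a ≤ y → y < t → pvBadA y = true)
    (hgood : pvBadA t = false) (hfuel : t - a ≤ (fuel : Int)) :
    pvSkipA fuel a = t := by
  induction fuel generalizing a with
  | zero =>
    have : a = t := by omega
    subst this; rfl
  | succ f ih =>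
    rcases eq_or_lt_of_le hat with heq | hlt
    · subst heq
      unfold pvSkipA; rw [hgood]; simp
    · unfold pvSkipA
      rw [hbad a (le_refl a) hlt]
      simp only [if_true]
      exact ih (a + 1) (by omega) (by omega)
        (fun y hy1 hy2 => hbad y (by omega) hy2) (by push_cast at hfuel ⊢; omega)

lemma solution_eq_pvB (n : Int) : solution n = (pvB n.toNat : Int) := by
  unfold solution
  rcases (by omega : n ≤ 0 ∨ 0 < n) with hn | hn
  · rw [PySem.List.pyRange_one_eq_nil hn]
    simp [pvB, show n.toNat = 0 by omega]
  · have hkey : ∀ k : Nat,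
        (PySem.List.pyRange 0 (k : Int) 1).foldl
          (fun answer _ => pvSkipA (2 * answer + 42).toNat (answer + 1)) 0
        = (pvB k : Int) := by
      intro k
      induction k with
      | zero => simp [PySem.List.pyRange_one_eq_nil, pvB]
      | succ m ihm =>
        rw [show ((m + 1 : Nat) : Int) = (m : Int) + 1 by push_cast; ring,
          PySem.List.pyRange_one_succ_right (by positivity), List.foldl_append, ihm]
        simp only [List.foldl_cons, List.foldl_nil]
        obtain ⟨hlt, hbound, hgood, hgap⟩ := pvB_step m
        apply pvSkipA_exact
        · push_cast; omega
        · push_cast; omega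
        · intro y hy1 hy2
          have hy1' : 1 ≤ y := by push_cast at hy1; omega
          have hyn : pvB m < y.toNat ∧ y.toNat < pvB (m + 1) := by
            push_cast at hy1 hy2; omega
          have := hgap y.toNat hyn.1 hyn.2
          cases hb : pvBadA y
          · exact absurd ((pvBadA_iff y hy1').mp hb) this
          · rfl
        · have h1 : (1 : Int) ≤ ((pvB (m + 1) : Nat) : Int) := by
            have := hgood.1; push_cast; omega
          rw [pvBadA_iff _ h1, Int.toNat_natCast]
          exact hgood
        · push_cast; omega
    have := hkey n.toNat
    rw [show ((n.toNat : Nat) : Int) = n by omega] at this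
    exact this

lemma pv_fdiv_nonneg (a b : Int) (ha : 0 ≤ a) (hb : 0 < b) :
    PySem.Int.floordiv a b = a / b := by
  rw [PySem.Int.floordiv, Int.fdiv_eq_ediv]
  simp [Or.inl (le_of_lt hb)]

lemma pv_fmod_nonneg (a b : Int) (hb : 0 < b) : PySem.Int.mod a b = a % b := by
  rw [PySem.Int.mod, Int.fmod_eq_emod]
  simp [Or.inl (le_of_lt hb)]

lemma pvQloop_eq (fuel : Nat) (p q mul : Int) (hp : 0 ≤ p) (hf : p.toNat < fuel) :
    pvQloop fuel p q mul = q + mul * (pvQ p.toNat : Int) := by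
  induction fuel generalizing p q mul with
  | zero => omega
  | succ f ih =>
    unfold pvQloop
    rcases (by omega : p = 0 ∨ 0 < p) with h0 | h0
    · subst h0
      simp [pvQ_zero]
    · rw [if_pos h0, pv_fdiv_nonneg p 9 (by omega) (by omega),
        pv_fmod_nonneg p 9 (by omega)]
      have hd9 : (p / 9).toNat = p.toNat / 9 := by omega
      have hrec := ih (p / 9) (q + (if p % 9 < 3 then p % 9 else p % 9 + 1) * mul) (mul * 10)
        (by omega) (by omega)
      rw [hrec, hd9]
      have hQe : (pvQ p.toNat : Int) = 10 * (pvQ (p.toNat / 9) : Int) + (pvM (p.toNat % 9) : Int) := by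
        rw [pvQ_eq p.toNat (by omega)]; push_cast; ring
      have hm : (if p % 9 < 3 then p % 9 else p % 9 + 1) = (pvM (p.toNat % 9) : Int) := by
        unfold pvM
        have hpm : p % 9 = ((p.toNat % 9 : Nat) : Int) := by omega
        rcases (by omega : p % 9 < 3 ∨ ¬ (p % 9 < 3)) with hc | hc
        · rw [if_pos hc, if_pos (by omega), hpm]
        · rw [if_neg hc, if_neg (by omega), hpm]; push_cast; ring
      rw [hm, hQe]
      ring

lemma solution_alt_eq_pvB (n : Int) : solution_alt n = (pvB n.toNat : Int) := by
  unfold solution_alt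
  rcases (by omega : n ≤ 0 ∨ 0 < n) with hn | hn
  · simp [hn, pvB, show n.toNat = 0 by omega]
  · rw [if_neg (by omega)]
    dsimp only
    set k := n.toNat with hk
    have hk1 : 1 ≤ k := by omega
    have hn1 : n - 1 = ((k - 1 : Nat) : Int) := by omega
    rw [hn1, pv_fdiv_nonneg _ 6 (by omega) (by omega), pv_fmod_nonneg _ 6 (by omega)]
    have hdiv : ((k - 1 : Nat) : Int) / 6 = (((k - 1) / 6 : Nat) : Int) := by omega
    have hmod : ((k - 1 : Nat) : Int) % 6 = (((k - 1) % 6 : Nat) : Int) := by omega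
    rw [hdiv, hmod]
    set pN := (k - 1) / 6 with hpN
    set jN := (k - 1) % 6 with hjN
    rw [pvQloop_eq _ _ _ _ (by omega) (by omega), Int.toNat_natCast]
    simp only [zero_add, one_mul]
    set qN := pvQ pN with hqN
    -- the filtered digit list is the cast of pvDs qN
    have hds : (PySem.List.pyRange 0 10 1).filter
        (fun d => !(d == 3) && !(PySem.Int.mod ((qN : Int) + d) 3 == 0))
        = (pvDs qN).map (fun k : Nat => (k : Int)) := by
      rw [show (10 : Int) = ((10 : Nat) : Int) from rfl, PySem.List.pyRange_zero_natCast,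
        List.filter_map]
      unfold pvDs
      refine congrArg (List.map fun k : Nat => (k : Int)) (List.filter_congr ?_)
      intro d hd
      simp only [Function.comp]
      rw [pv_fmod_nonneg _ 3 (by omega)]
      have h1 : ((d : Int) == 3) = (d == 3) := by
        rcases (by omega : d = 3 ∨ d ≠ 3) with hc | hc
        · subst hc; rfl
        · simp [hc, show (d : Int) ≠ 3 by omega]
      have h2 : (((qN : Int) + (d : Int)) % 3 == 0) = (decide ((qN + d) % 3 = 0)) := by
        have h3 : ((qN : Int) + (d : Int)) % 3 = (((qN + d) % 3 : Nat) : Int) := by push_cast; omega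
        rw [h3]
        rcases (by omega : (qN + d) % 3 = 0 ∨ (qN + d) % 3 ≠ 0) with hc | hc
        · simp [hc]
        · rw [decide_eq_false hc]
          exact beq_eq_false_iff_ne.mpr (by omega)
      rw [h1, h2]
      rcases (by omega : d = 3 ∨ d ≠ 3) with hc | hc <;>
        rcases (by omega : (qN + d) % 3 = 0 ∨ (qN + d) % 3 ≠ 0) with hc2 | hc2 <;>
        simp [hc, hc2]
    rw [hds]
    have hjlt : jN < (pvDs qN).length := by rw [pvDs_len]; omega
    have hget : PySem.List.pyGet? ((pvDs qN).map (fun k : Nat => (k : Int))) ((jN : Nat) : Int)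
        = some (((pvDs qN).getD jN 0 : Nat) : Int) := by
      rw [PySem.List.pyGet?_natCast, List.getElem?_map,
        List.getElem?_eq_getElem hjlt]
      rw [List.getD_eq_getElem _ _ hjlt]
      rfl
    rw [hget]
    simp only [Option.getD_some]
    unfold pvB pvV
    rw [if_neg (by omega)]
    push_cast
    ring

-- ===== VERDICT (by name: the statement is the Claim_ definition above) =====
theorem solution_spec : Claim_equal_solution := by
  intro n _
  unfold Spec_solution
  rw [solution_eq_pvB, solution_alt_eq_pvB]
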